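-- pv_equiv track=rewrite | github.com/aostuni/kneser-toughness | KruskalKatona.py | cascade
-- ===== SOURCE A (Python) =====
-- from math import comb
--
-- def cascade(n, i):
--     a = []
--     for k in range(i, 1, -1):
--         m = 0
--         while comb(m, k) < n:
--             m += 1
--         a.append(m - 1)
--         n -= comb(m - 1, k)
--     a.append(n)
--     a.append(0)
--     a.reverse()
--     return a
-- ===== SOURCE B (Python) =====
-- from math import comb
--
-- def cascade(n, i):
--     a = []
--     for k in range(i, 1, -1):
--         # find least m with comb(m, k) >= n by doubling + binary search
--         lo, hi = k, k + 1
--         while comb(hi, k) < n: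
--             lo, hi = hi, hi * 2
--         while lo < hi:
--             mid = (lo + hi) // 2
--             if comb(mid, k) < n:
--                 lo = mid + 1
--             else:
--                 hi = mid
--         a.append(lo - 1)
--         n -= comb(lo - 1, k)
--     return [0, n] + a[::-1]
-- ===== Notes on version B (the rewrite author's own statement) =====
-- stated objective: faster
-- what changed: Per level, the unit-step linear scan for the least m with comb(m,k) >= n is replaced by exponential doubling plus binary search, and the final append/append/reverse is replaced by building [0, n] + reversed prefix directly.
-- outside the precondition, e.g. on cascade(0, 2): A raises ValueError, B returns [0, 0, 1]
import Mathlib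
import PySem

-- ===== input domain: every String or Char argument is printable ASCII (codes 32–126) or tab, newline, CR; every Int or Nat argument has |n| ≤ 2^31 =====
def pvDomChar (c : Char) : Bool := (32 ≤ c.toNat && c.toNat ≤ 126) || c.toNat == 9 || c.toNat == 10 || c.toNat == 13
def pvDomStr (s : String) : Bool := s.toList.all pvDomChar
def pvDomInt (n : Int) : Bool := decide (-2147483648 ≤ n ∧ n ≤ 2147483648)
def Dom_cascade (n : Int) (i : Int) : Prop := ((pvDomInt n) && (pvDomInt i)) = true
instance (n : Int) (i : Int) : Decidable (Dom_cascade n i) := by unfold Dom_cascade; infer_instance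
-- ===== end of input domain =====

-- B replaces A's unit-step linear search for the least m with comb(m,k) >= n by doubling
-- plus binary search (objective: faster).

-- ===== PORT A =====
-- math.comb: exact for nonnegative arguments (Pre_ keeps every call nonnegative; Python raises ValueError otherwise)
def pyComb (m k : Int) : Int := (Nat.choose m.toNat k.toNat : Int)

-- the loop 'm = 0; while comb(m, k) < n: m += 1'; fuel is a totality guard only,
-- always sufficient under Pre_ (lemma lsearchA_eq below)
def lsearchA (n k : Int) (m : Nat) : Nat → Nat
  | 0 => m
  | fuel + 1 => if pyComb m k < n then lsearchA n k (m + 1) fuel else m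

def stepA (st : List Int × Int) (k : Int) : List Int × Int :=
  let m : Nat := lsearchA st.2 k 0 (k.toNat + st.2.toNat + 1)
  (st.1 ++ [(m : Int) - 1], st.2 - pyComb ((m : Int) - 1) k)

def cascade (n : Int) (i : Int) : List Int :=
  let st := (PySem.List.pyRange i 1 (-1)).foldl stepA ([], n)
  ((st.1 ++ [st.2]) ++ [0]).reverse

-- ===== PORT B =====
-- the doubling loop 'while comb(hi, k) < n: lo, hi = hi, hi * 2'; fuel is a totality
-- guard only, always sufficient under Pre_ (lemma dsearchB_spec below)
def dsearchB (n k : Int) (lo hi : Nat) : Nat → Nat × Nat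
  | 0 => (lo, hi)
  | fuel + 1 => if pyComb hi k < n then dsearchB n k hi (hi * 2) fuel else (lo, hi)

-- the binary-search loop 'while lo < hi: …'; fuel = hi - lo is a totality guard
-- only, always sufficient (lemma bsearchB_eq below)
def bsearchB (n k : Int) (lo hi : Nat) : Nat → Nat
  | 0 => lo
  | fuel + 1 =>
    if lo < hi then
      let mid := (lo + hi) / 2
      if pyComb mid k < n then bsearchB n k (mid + 1) hi fuel else bsearchB n k lo mid fuel
    else lo

def stepB (st : List Int × Int) (k : Int) : List Int × Int :=
  let p := dsearchB st.2 k k.toNat (k.toNat + 1) (st.2.toNat + 1)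
  let lo := bsearchB st.2 k p.1 p.2 (p.2 - p.1)
  (st.1 ++ [(lo : Int) - 1], st.2 - pyComb ((lo : Int) - 1) k)

def cascade_alt (n : Int) (i : Int) : List Int :=
  let st := (PySem.List.pyRange i 1 (-1)).foldl stepB ([], n)
  [0, st.2] ++ st.1.reverse

-- ===== PRECONDITION & SPEC =====
-- Pre_ excludes exactly the inputs where A raises: for n ≤ 0 with i ≥ 2 the linear
-- search stops at m = 0 and A calls comb(-1, k), a ValueError.
def Pre_cascade (n : Int) (i : Int) : Prop := 1 ≤ n ∨ i ≤ 1
instance (n : Int) (i : Int) : Decidable (Pre_cascade n i) := by unfold Pre_cascade; infer_instance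
def pvWitness_cascade : Int × Int := (5, 4)

def Spec_cascade (n : Int) (i : Int) (out : List Int) : Prop := out = cascade_alt n i
instance (n : Int) (i : Int) (out : List Int) : Decidable (Spec_cascade n i out) := by unfold Spec_cascade; infer_instance

-- ===== CLAIM (what is proved, stated in full; the proofs are below) =====
def Claim_equal_cascade : Prop := ∀ (n : Int) (i : Int), Dom_cascade n i → Pre_cascade n i → Spec_cascade n i (cascade n i)

-- ===== LEMMAS AND PROOFS =====

theorem pyComb_natCast (m : Nat) (k : Int) : pyComb (m : Int) k = (Nat.choose m k.toNat : Int) := by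
  simp [pyComb]

theorem pyComb_mono (k : Int) {a b : Nat} (h : a ≤ b) : pyComb (a : Int) k ≤ pyComb (b : Int) k := by
  simp only [pyComb_natCast]
  exact_mod_cast Nat.choose_le_choose k.toNat h

-- comb(kk + j, kk) ≥ j + 1 for kk ≥ 1
theorem choose_lower (kk j : Nat) (hk : 1 ≤ kk) : j + 1 ≤ Nat.choose (kk + j) kk := by
  have hs : Nat.choose (kk + j) (kk + j - kk) = Nat.choose (kk + j) kk :=
    Nat.choose_symm (by omega)
  have hj : kk + j - kk = j := by omega
  rw [← hs, hj]
  calc j + 1 = Nat.choose (j + 1) j := (Nat.choose_succ_self_right j).symm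
    _ ≤ Nat.choose (kk + j) j := Nat.choose_le_choose j (by omega)

theorem pyComb_big (n k : Int) (hk : 1 ≤ k.toNat) {hi : Nat} (hhi : k.toNat + n.toNat ≤ hi) :
    n ≤ pyComb (hi : Int) k := by
  have h1 : (n.toNat : Nat) + 1 ≤ Nat.choose (k.toNat + n.toNat) k.toNat := choose_lower _ _ hk
  have h2 : Nat.choose (k.toNat + n.toNat) k.toNat ≤ Nat.choose hi k.toNat :=
    Nat.choose_le_choose _ hhi
  have h3 : n ≤ (n.toNat : Int) := Int.self_le_toNat n
  rw [pyComb_natCast]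
  have : (n.toNat : Int) + 1 ≤ (Nat.choose hi k.toNat : Int) := by exact_mod_cast Nat.le_trans h1 h2
  omega

theorem lsearchA_eq (n k : Int) (r : Nat)
    (h1 : n ≤ pyComb (r : Int) k) (h2 : ∀ m : Nat, m < r → pyComb (m : Int) k < n) :
    ∀ fuel m, m ≤ r → r ≤ m + fuel → lsearchA n k m fuel = r := by
  intro fuel
  induction fuel with
  | zero => intro m h3 h4; simp only [lsearchA]; omega
  | succ f ih =>
    intro m h3 h4
    simp only [lsearchA]
    by_cases hc : pyComb (m : Int) k < n
    · rw [if_pos hc]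
      have hmr : m < r := by
        rcases Nat.lt_or_ge m r with h | h
        · exact h
        · have : m = r := by omega
          subst this; omega
      exact ih (m + 1) (by omega) (by omega)
    · rw [if_neg hc]
      have : r ≤ m := by
        by_contra hcon
        exact hc (absurd (h2 m (by omega)) (by omega))
      omega

theorem bsearchB_eq (n k : Int) (r : Nat)
    (h1 : n ≤ pyComb (r : Int) k) (h2 : ∀ m : Nat, m < r → pyComb (m : Int) k < n) :
    ∀ fuel lo hi, hi - lo ≤ fuel → lo ≤ r → r ≤ hi → bsearchB n k lo hi fuel = r := by
  intro fuel
  induction fuel with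
  | zero =>
    intro lo hi hd hlo hhi
    simp only [bsearchB]
    omega
  | succ d ih =>
    intro lo hi hd hlo hhi
    simp only [bsearchB]
    by_cases h : lo < hi
    · rw [if_pos h]
      by_cases hc : pyComb (((lo + hi) / 2 : Nat) : Int) k < n
      · rw [if_pos hc]
        have hmr : (lo + hi) / 2 < r := by
          by_contra hcon
          have := pyComb_mono k (show r ≤ (lo + hi) / 2 by omega)
          omega
        exact ih ((lo + hi) / 2 + 1) hi (by omega) (by omega) hhi
      · rw [if_neg hc]
        have hrm : r ≤ (lo + hi) / 2 := by
          by_contra hcon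
          exact hc (h2 _ (by omega))
        exact ih lo ((lo + hi) / 2) (by omega) hlo hrm
    · rw [if_neg h]
      omega

theorem dsearchB_spec (n k : Int) (hk : 1 ≤ k.toNat) :
    ∀ fuel lo hi, (∀ m : Nat, m < lo → pyComb (m : Int) k < n) → lo ≤ hi → 1 ≤ hi →
      k.toNat + n.toNat ≤ hi + fuel →
      (∀ m : Nat, m < (dsearchB n k lo hi fuel).1 → pyComb (m : Int) k < n) ∧
        (dsearchB n k lo hi fuel).1 ≤ (dsearchB n k lo hi fuel).2 ∧
        n ≤ pyComb ((dsearchB n k lo hi fuel).2 : Int) k := by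
  intro fuel
  induction fuel with
  | zero =>
    intro lo hi h0 hlh hh1 hf
    simp only [dsearchB]
    exact ⟨h0, hlh, pyComb_big n k hk (by omega)⟩
  | succ f ih =>
    intro lo hi h0 hlh hh1 hf
    simp only [dsearchB]
    by_cases hc : pyComb (hi : Int) k < n
    · rw [if_pos hc]
      refine ih hi (hi * 2) ?_ (by omega) (by omega) (by omega)
      intro m hm
      have := pyComb_mono k (show m ≤ hi by omega)
      omega
    · rw [if_neg hc]
      exact ⟨h0, hlh, not_lt.mp hc⟩

theorem step_eq (a : List Int) (n k : Int) (hk : 2 ≤ k) (hn : 1 ≤ n) :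
    stepA (a, n) k = stepB (a, n) k ∧ 1 ≤ (stepA (a, n) k).2 := by
  have hkk : 2 ≤ k.toNat := by omega
  have hex : ∃ m : Nat, n ≤ pyComb (m : Int) k :=
    ⟨k.toNat + n.toNat, pyComb_big n k (by omega) (le_refl _)⟩
  set r := Nat.find hex with hrdef
  have h1 : n ≤ pyComb (r : Int) k := Nat.find_spec hex
  have h2 : ∀ m : Nat, m < r → pyComb (m : Int) k < n := by
    intro m hm
    have := Nat.find_min hex hm
    omega
  have hrb : r ≤ k.toNat + n.toNat := Nat.find_le (pyComb_big n k (by omega) (le_refl _))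
  have hr1 : 1 ≤ r := by
    by_contra hcon
    have hr0 : r = 0 := by omega
    have : pyComb ((0 : Nat) : Int) k = 0 := by
      rw [pyComb_natCast]
      rw [Nat.choose_eq_zero_of_lt (by omega)]
      simp
    rw [hr0] at h1
    omega
  -- A's linear search finds r
  have hA : lsearchA n k 0 (k.toNat + n.toNat + 1) = r :=
    lsearchA_eq n k r h1 h2 _ 0 (by omega) (by omega)
  -- B's doubling + binary search finds r
  have hzero : ∀ m : Nat, m < k.toNat → pyComb (m : Int) k < n := by
    intro m hm
    have : pyComb (m : Int) k = 0 := by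
      rw [pyComb_natCast, Nat.choose_eq_zero_of_lt (by simpa using hm)]
      simp
    omega
  obtain ⟨hd0, hd1, hd2⟩ :=
    dsearchB_spec n k (by omega) (n.toNat + 1) k.toNat (k.toNat + 1) hzero (by omega)
      (by omega) (by omega)
  have hlor : (dsearchB n k k.toNat (k.toNat + 1) (n.toNat + 1)).1 ≤ r := by
    by_contra hcon
    have := hd0 r (by omega)
    omega
  have hrhi : r ≤ (dsearchB n k k.toNat (k.toNat + 1) (n.toNat + 1)).2 :=
    Nat.find_min' hex hd2
  have hB : bsearchB n k (dsearchB n k k.toNat (k.toNat + 1) (n.toNat + 1)).1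
      (dsearchB n k k.toNat (k.toNat + 1) (n.toNat + 1)).2
      ((dsearchB n k k.toNat (k.toNat + 1) (n.toNat + 1)).2 -
        (dsearchB n k k.toNat (k.toNat + 1) (n.toNat + 1)).1) = r :=
    bsearchB_eq n k r h1 h2 _ _ _ (le_refl _) hlor hrhi
  have hlow : pyComb ((r : Int) - 1) k < n := by
    have : ((r : Int) - 1) = ((r - 1 : Nat) : Int) := by omega
    rw [this]
    exact h2 (r - 1) (by omega)
  constructor
  · simp only [stepA, stepB, hA, hB]
  · simp only [stepA, hA]
    omega

theorem fold_eq : ∀ (l : List Int), (∀ k ∈ l, 2 ≤ k) → ∀ (a : List Int) (n : Int), 1 ≤ n →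
    l.foldl stepA (a, n) = l.foldl stepB (a, n) ∧ 1 ≤ (l.foldl stepA (a, n)).2 := by
  intro l
  induction l with
  | nil => intro _ a n hn; exact ⟨rfl, hn⟩
  | cons k l ih =>
    intro hmem a n hn
    obtain ⟨hstep, hpos⟩ := step_eq a n k (hmem k (by simp)) hn
    simp only [List.foldl_cons]
    rcases hst : stepA (a, n) k with ⟨a', n'⟩
    rw [hst] at hstep hpos
    obtain ⟨ih1, ih2⟩ := ih (fun k' hk' => hmem k' (by simp [hk'])) a' n' hpos
    rw [← hstep]
    exact ⟨ih1, ih2⟩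

-- ===== VERDICT (by name: the statement is the Claim_ definition above) =====
theorem cascade_spec : Claim_equal_cascade := by
  intro n i _ hpre
  unfold Spec_cascade cascade cascade_alt
  by_cases hn : 1 ≤ n
  · have hmem : ∀ k ∈ PySem.List.pyRange i 1 (-1), 2 ≤ k := by
      intro k hk
      have := (PySem.List.mem_pyRange_neg_one.mp hk).1
      omega
    obtain ⟨heq, -⟩ := fold_eq (PySem.List.pyRange i 1 (-1)) hmem [] n hn
    rw [heq]
    simp
  · have hi : i ≤ 1 := by
      rcases hpre with h | h
      · omega
      · exact h
    rw [PySem.List.pyRange_neg_one_eq_nil hi]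
    simp
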